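-- pv_equiv track=rewrite | github.com/RedExtreme12/Crypt_Lab_5 | RSA.py | encrypt_str
-- ===== SOURCE A (Python) =====
-- def string_to_bits(_str):
--     return "".join((bin(ord(c))[2:]).zfill(8) for c in _str)
--
-- def encrypt_str(message, public_key):
--     (e, n) = public_key
--     res = ""
--     bin_str = string_to_bits(message)
--     bin_str += "1"
--     while len(bin_str) % (n.bit_length()-1) != 0:
--         bin_str += "0"
--     for i in range(0, len(bin_str), n.bit_length()-1):
--         enc_i = pow(int(bin_str[i:i+n.bit_length()-1], 2), e, n)
--         bin_i = format(enc_i, 'b').zfill(n.bit_length())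
--         res += bin_i
--     return res
-- ===== SOURCE B (Python) =====
-- def encrypt_str(message, public_key):
--     (e, n) = public_key
--     k = n.bit_length() - 1
--     # accumulate the padded bit sequence as one integer v of exact bit width L
--     v = 0
--     L = 0
--     for c in message:
--         v = (v << 8) | ord(c)
--         L += 8
--     v = (v << 1) | 1          # the '1' marker
--     L += 1
--     pad = -L % k              # zeros needed to reach a multiple of k, in closed form
--     v <<= pad
--     L += pad
--     mask = (1 << k) - 1
--     out = []
--     for i in range(0, L, k):
--         block = (v >> (L - i - k)) & mask
--         out.append(format(pow(block, e, n), 'b').zfill(n.bit_length()))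
--     return "".join(out)
-- ===== Notes on version B (the rewrite author's own statement) =====
-- stated objective: alternative
-- what changed: B maintains the padded bit sequence as one big integer (value plus exact bit length) built by shifts, computes the zero padding in closed form as (-L) % k instead of A's grow-one-zero-at-a-time loop, and extracts each encryption block by shift-and-mask integer arithmetic instead of A's slice-a-substring-and-reparse int(s, 2); …
-- outside the precondition, e.g. on encrypt_str('', (3, 0)): A returns '', B raises ValueError; on encrypt_str('', (-1, 5)): A returns '011', B returns '011'
import Mathlib
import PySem

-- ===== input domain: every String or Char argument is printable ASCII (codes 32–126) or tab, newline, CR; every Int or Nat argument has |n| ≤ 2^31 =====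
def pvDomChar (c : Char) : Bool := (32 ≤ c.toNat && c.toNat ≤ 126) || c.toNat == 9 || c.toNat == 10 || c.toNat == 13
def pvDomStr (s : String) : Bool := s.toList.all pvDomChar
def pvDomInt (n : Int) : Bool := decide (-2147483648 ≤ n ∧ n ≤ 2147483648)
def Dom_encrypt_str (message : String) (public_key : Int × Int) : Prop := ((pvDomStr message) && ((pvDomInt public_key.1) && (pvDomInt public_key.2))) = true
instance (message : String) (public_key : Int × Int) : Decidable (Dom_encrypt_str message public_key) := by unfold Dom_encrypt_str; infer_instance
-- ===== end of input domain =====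

-- B replaces A's string-slice-and-reparse block loop by integer bit arithmetic on one big
-- accumulator (value + exact bit length), with the zero padding computed in closed form
-- (objective: alternative representation, same asymptotic cost).

-- Shared primitive: Python's three-argument pow(b, e, m). PySem.Int.powMod is extensionally
-- this function but is defined as (b ^ e) % m, which is not evaluable for the exponents Dom
-- admits (e up to 2^31); this is CPython's square-and-multiply, exact for 0 ≤ b (the only
-- bases either program passes) and m ≠ 0 (Python raises ValueError at m = 0; outside Pre_).
def powModNat (b e m : Nat) : Nat :=
  if h : e = 0 then 1 % m
  else
    let r := powModNat b (e / 2) m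
    let r2 := r * r % m
    if e % 2 = 1 then r2 * (b % m) % m else r2
termination_by e
decreasing_by exact Nat.div_lt_self (Nat.pos_of_ne_zero h) one_lt_two

def pyPow (b : Int) (e : Nat) (m : Int) : Int :=
  let r : Nat := powModNat b.natAbs e m.natAbs
  if m < 0 ∧ r ≠ 0 then (r : Int) + m else (r : Int)

-- ===== PORT A =====
-- "".join((bin(ord(c))[2:]).zfill(8) for c in _str)
def string_to_bits (s : String) : List Char :=
  PySem.Chars.join [] (s.toList.map (fun c =>
    PySem.Chars.zfill (PySem.List.slice (PySem.Int.toBinChars0b ((c.toNat : Int))) (some 2) none) 8))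

-- int(s, 2), hand-ported: exact on nonempty '0'/'1' strings, the only arguments A passes it
-- (bin_str consists of '0'/'1' only); PySem.Int.ofCharsBase? is the same function there.
def binVal (cs : List Char) : Nat :=
  cs.foldl (fun a c => 2 * a + (if c = '1' then 1 else 0)) 0

-- while len(bin_str) % (n.bit_length()-1) != 0: bin_str += "0"
def padLoop (bs : List Char) (k : Nat) : List Char :=
  if _h : k = 0 then bs  -- Python raises ZeroDivisionError at k = 0 (|n| ≤ 1; outside Pre_)
  else if bs.length % k ≠ 0 then padLoop (bs ++ ['0']) k else bs
termination_by (k - bs.length % k) % k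
decreasing_by
  rename_i hnz
  simp only [List.length_append, List.length_cons, List.length_nil]
  have hk1 : 1 < k := by
    rcases Nat.lt_or_ge k 2 with h2 | h2
    · interval_cases k
      · exact absurd rfl _h
      · simp [Nat.mod_one] at hnz
    · omega
  have hr : bs.length % k < k := Nat.mod_lt _ (by omega)
  have h1 : (bs.length + 1) % k = (bs.length % k + 1) % k := by
    conv_lhs => rw [Nat.add_mod, Nat.mod_eq_of_lt hk1]
  rcases Nat.lt_or_ge (bs.length % k + 1) k with hlt | hge
  · rw [h1, Nat.mod_eq_of_lt hlt, Nat.mod_eq_of_lt (a := k - (bs.length % k + 1)) (by omega),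
      Nat.mod_eq_of_lt (a := k - bs.length % k) (by omega)]
    omega
  · have heq : bs.length % k + 1 = k := by omega
    rw [h1, heq, Nat.mod_self, Nat.sub_zero, Nat.mod_self,
      Nat.mod_eq_of_lt (a := k - bs.length % k) (by omega)]
    omega

def encrypt_str (message : String) (public_key : Int × Int) : String :=
  let e := public_key.1
  let n := public_key.2
  let bin_str0 := string_to_bits message ++ ['1']
  let k : Nat := PySem.Int.bitLength n - 1
  let bin_str := padLoop bin_str0 k
  let res := (PySem.List.pyRange 0 (bin_str.length : Int) (k : Int)).foldl
    (fun res i =>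
      res ++ PySem.Chars.zfill
        (PySem.Int.toBinChars
          (pyPow ((binVal (PySem.List.slice bin_str (some i) (some (i + (k : Int)))) : Int)) e.toNat n))
        ((PySem.Int.bitLength n : Nat) : Int)) []
  String.ofList res

-- ===== PORT B =====
-- v and L are Python ints that stay ≥ 0 throughout (built by shifts/or from 0), ported as Nat.
def encrypt_str_alt (message : String) (public_key : Int × Int) : String :=
  let e := public_key.1
  let n := public_key.2
  let k : Nat := PySem.Int.bitLength n - 1
  let vL := message.toList.foldl (fun (p : Nat × Nat) c => ((p.1 <<< 8) ||| c.toNat, p.2 + 8)) (0, 0)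
  let v1 := (vL.1 <<< 1) ||| 1
  let L1 := vL.2 + 1
  let pad := (PySem.Int.mod (-(L1 : Int)) (k : Int)).toNat
  let v := v1 <<< pad
  let L := L1 + pad
  let mask := (1 <<< k) - 1
  let out := (PySem.List.pyRange 0 (L : Int) (k : Int)).foldl
    (fun out i =>
      out ++ [PySem.Chars.zfill
        (PySem.Int.toBinChars (pyPow ((((v >>> (L - i.toNat - k)) &&& mask : Nat) : Int)) e.toNat n))
        ((PySem.Int.bitLength n : Nat) : Int)]) []
  String.ofList (PySem.Chars.join [] out)

-- ===== PRECONDITION & SPEC =====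
-- Pre_ restricts to RSA's natural domain: a modulus with |n| ≥ 2 and a non-negative exponent.
-- Excluded inputs A still accepts: n = ±1 raises ZeroDivisionError (block size 0); n = 0 makes the
-- block size -1, on which A's empty-string result is an accident of range() with a negative step
-- while B raises (a negative shift); e < 0 makes pow() compute modular inverses (ValueError
-- whenever a block is not coprime to n), outside RSA encryption's domain.
def Pre_encrypt_str (message : String) (public_key : Int × Int) : Prop :=
  0 ≤ public_key.1 ∧ 2 ≤ public_key.2.natAbs
instance (message : String) (public_key : Int × Int) : Decidable (Pre_encrypt_str message public_key) := by unfold Pre_encrypt_str; infer_instance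

def pvWitness_encrypt_str : String × (Int × Int) := ("a", (3, 5))

def Spec_encrypt_str (message : String) (public_key : Int × Int) (out : String) : Prop := out = encrypt_str_alt message public_key
instance (message : String) (public_key : Int × Int) (out : String) : Decidable (Spec_encrypt_str message public_key out) := by unfold Spec_encrypt_str; infer_instance

-- ===== CLAIM (what is proved, stated in full; the proofs are below) =====
def Claim_equal_encrypt_str : Prop := ∀ (message : String) (public_key : Int × Int), Dom_encrypt_str message public_key → Pre_encrypt_str message public_key → Spec_encrypt_str message public_key (encrypt_str message public_key)

-- ===== LEMMAS AND PROOFS =====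

-- the per-character 8-bit block A builds and its value
def pvBlk (m : Nat) : List Char :=
  PySem.Chars.zfill (PySem.List.slice (PySem.Int.toBinChars0b ((m : Int))) (some 2) none) 8

theorem pvBlk_spec : ∀ m : Nat, m < 128 → (pvBlk m).length = 8 ∧ binVal (pvBlk m) = m := by
  decide

theorem binVal_foldl_from (cs : List Char) : ∀ a : Nat,
    cs.foldl (fun a c => 2 * a + (if c = '1' then 1 else 0)) a = a * 2 ^ cs.length + binVal cs := by
  induction cs with
  | nil => intro a; simp [binVal]
  | cons c cs ih =>
    intro a
    have h1 := ih (2 * a + (if c = '1' then 1 else 0))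
    have h2 := ih (2 * 0 + (if c = '1' then 1 else 0))
    simp only [List.foldl_cons, List.length_cons, binVal] at *
    rw [h1, h2]
    ring

theorem binVal_append (xs ys : List Char) :
    binVal (xs ++ ys) = binVal xs * 2 ^ ys.length + binVal ys := by
  unfold binVal
  rw [List.foldl_append, binVal_foldl_from]
  rfl

theorem binVal_lt (cs : List Char) : binVal cs < 2 ^ cs.length := by
  induction cs using List.reverseRecOn with
  | nil => simp [binVal]
  | append_singleton xs x ih =>
    rw [binVal_append]
    simp only [List.length_append, List.length_cons, List.length_nil]
    have hx : binVal [x] ≤ 1 := by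
      unfold binVal; simp only [List.foldl_cons, List.foldl_nil]; split <;> omega
    have h2 : 2 ^ (xs.length + 1) = 2 ^ xs.length * 2 := by rw [pow_succ]
    rw [h2]
    omega

theorem binVal_replicate_zero (p : Nat) : binVal (List.replicate p '0') = 0 := by
  induction p with
  | zero => rfl
  | succ p ih =>
    rw [List.replicate_succ', binVal_append, ih]
    simp [binVal]

theorem join_nil_eq_flatten (parts : List (List Char)) :
    PySem.Chars.join [] parts = parts.flatten := by
  simp only [PySem.Chars.join, List.intercalate]
  induction parts with
  | nil => rfl
  | cons p ps ih =>
    cases ps with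
    | nil => simp [List.intersperse]
    | cons q qs => simp_all [List.intersperse]

theorem flatten_blk_len (cs : List Char) (h : ∀ c ∈ cs, c.toNat < 128) :
    ((cs.map (fun c => pvBlk c.toNat)).flatten).length = 8 * cs.length := by
  induction cs with
  | nil => simp
  | cons d ds ih =>
    simp only [List.map_cons, List.flatten_cons, List.length_append, List.length_cons]
    rw [ih (fun x hx => h x (List.mem_cons_of_mem _ hx)),
      (pvBlk_spec d.toNat (h d (by simp))).1]
    ring

-- B's character fold computes the value and length of A's bit string
theorem fold_chars (cs : List Char) : ∀ a L0 : Nat, (∀ c ∈ cs, c.toNat < 128) →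
    cs.foldl (fun (p : Nat × Nat) c => ((p.1 <<< 8) ||| c.toNat, p.2 + 8)) (a, L0)
      = (a * 2 ^ (8 * cs.length) + binVal (cs.map (fun c => pvBlk c.toNat)).flatten,
         L0 + 8 * cs.length) := by
  induction cs with
  | nil => intro a L0 _; simp [binVal]
  | cons c cs ih =>
    intro a L0 hc
    have hc0 : c.toNat < 128 := hc c (by simp)
    have hrest : ∀ x ∈ cs, x.toNat < 128 := fun x hx => hc x (by simp [hx])
    obtain ⟨hlen, hval⟩ := pvBlk_spec c.toNat hc0
    have hstep : (a <<< 8) ||| c.toNat = a * 2 ^ 8 + c.toNat := by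
      rw [Nat.shiftLeft_eq, mul_comm a (2 ^ 8), ← Nat.two_pow_add_eq_or_of_lt (by omega) a,
        mul_comm (2 ^ 8) a]
    simp only [List.foldl_cons, List.map_cons, List.flatten_cons, List.length_cons]
    rw [hstep, ih _ _ hrest, binVal_append, flatten_blk_len cs hrest, hval]
    simp only [Prod.mk.injEq]
    constructor
    · rw [show 8 * (cs.length + 1) = 8 * cs.length + 8 from by ring, pow_add]
      ring
    · omega

-- padLoop appends exactly the closed-form number of zeros
theorem padLoop_eq_aux (k : Nat) (hk : 0 < k) : ∀ (p : Nat) (bs : List Char),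
    (k - bs.length % k) % k = p → padLoop bs k = bs ++ List.replicate p '0' := by
  intro p
  induction p using Nat.strong_induction_on with
  | _ p ih =>
    intro bs hp
    rw [padLoop]
    split
    · omega
    · rename_i hknz
      split
      · rename_i hnz
        have hk1 : 1 < k := by
          rcases Nat.lt_or_ge k 2 with h2 | h2
          · have hone : k = 1 := by omega
            subst hone
            simp [Nat.mod_one] at hnz
          · omega
        have hr : bs.length % k < k := Nat.mod_lt _ (by omega)
        have h1 : (bs.length + 1) % k = (bs.length % k + 1) % k := by
          conv_lhs => rw [Nat.add_mod, Nat.mod_eq_of_lt hk1]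
        have hplen : (bs ++ ['0']).length = bs.length + 1 := by simp
        rcases Nat.lt_or_ge (bs.length % k + 1) k with hlt | hge
        · have hm : (k - (bs ++ ['0']).length % k) % k = p - 1 := by
            rw [hplen, h1, Nat.mod_eq_of_lt hlt,
              Nat.mod_eq_of_lt (a := k - (bs.length % k + 1)) (by omega)]
            rw [Nat.mod_eq_of_lt (a := k - bs.length % k) (by omega)] at hp
            omega
          have hp1 : 1 ≤ p := by
            rw [Nat.mod_eq_of_lt (a := k - bs.length % k) (by omega)] at hp
            omega
          rw [ih (p - 1) (by omega) (bs ++ ['0']) hm, List.append_assoc]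
          congr 1
          rw [show p = (p - 1) + 1 from by omega, List.replicate_succ]
          rfl
        · have heq : bs.length % k + 1 = k := by omega
          have hm : (k - (bs ++ ['0']).length % k) % k = 0 := by
            rw [hplen, h1, heq, Nat.mod_self, Nat.sub_zero, Nat.mod_self]
          have hp1 : p = 1 := by
            rw [Nat.mod_eq_of_lt (a := k - bs.length % k) (by omega)] at hp
            omega
          rw [ih 0 (by omega) (bs ++ ['0']) hm, List.append_assoc, hp1]
          rfl
      · rename_i hz
        have : bs.length % k = 0 := by omega
        rw [this] at hp
        rw [Nat.sub_zero, Nat.mod_self] at hp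
        rw [← hp]
        simp

theorem padLoop_eq (k : Nat) (hk : 0 < k) (bs : List Char) :
    padLoop bs k = bs ++ List.replicate ((k - bs.length % k) % k) '0' :=
  padLoop_eq_aux k hk _ bs rfl

-- Python's (-L) % k, for k > 0, as the Nat padding count
theorem pad_count (L k : Nat) (hk : 0 < k) :
    (PySem.Int.mod (-(L : Int)) (k : Int)).toNat = (k - L % k) % k := by
  rw [PySem.Int.mod_eq_emod_of_pos (by exact_mod_cast hk)]
  have hdm := Nat.div_add_mod L k
  have hdmi : (k : Int) * ((L / k : Nat) : Int) + ((L % k : Nat) : Int) = (L : Int) := by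
    exact_mod_cast hdm
  have h1 : (-(L : Int)) % (k : Int) = (-((L % k : Nat) : Int)) % (k : Int) := by
    rw [show (-(L : Int)) = -((L % k : Nat) : Int) + (k : Int) * (-((L / k : Nat) : Int)) from by
      rw [← hdmi]; ring, Int.add_mul_emod_self_left]
  rw [h1]
  rcases Nat.eq_zero_or_pos (L % k) with h0 | hpos
  · rw [h0]
    norm_num [Nat.mod_self]
  · have hr : L % k < k := Nat.mod_lt _ hk
    have h2 : (-((L % k : Nat) : Int)) % (k : Int) = ((k - L % k : Nat) : Int) := by
      rw [show (-((L % k : Nat) : Int)) = ((k - L % k : Nat) : Int) + (k : Int) * (-1) from by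
        push_cast [Nat.cast_sub (le_of_lt hr)]; ring, Int.add_mul_emod_self_left]
      exact Int.emod_eq_of_lt (by positivity) (by exact_mod_cast Nat.sub_lt hk hpos)
    rw [h2, Int.toNat_natCast, Nat.mod_eq_of_lt (a := k - L % k) (b := k) (by omega)]

-- the padded length is a multiple of k
theorem pad_dvd (L k : Nat) (hk : 0 < k) : k ∣ L + (k - L % k) % k := by
  rcases Nat.eq_zero_or_pos (L % k) with h0 | hpos
  · rw [h0, Nat.sub_zero, Nat.mod_self, Nat.add_zero]
    exact Nat.dvd_of_mod_eq_zero h0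
  · have hr : L % k < k := Nat.mod_lt _ hk
    rw [Nat.mod_eq_of_lt (by omega : k - L % k < k)]
    refine ⟨L / k + 1, ?_⟩
    have h1 := Nat.div_add_mod L k
    have h2 : k * (L / k + 1) = k * (L / k) + k := by ring
    omega

-- slice-and-reparse = shift-and-mask
theorem block_eq (bs : List Char) (m k : Nat) (hmk : m + k ≤ bs.length) :
    binVal ((bs.drop m).take k)
      = (binVal bs >>> (bs.length - m - k)) &&& ((1 <<< k) - 1) := by
  have hdecomp : bs = bs.take m ++ ((bs.drop m).take k ++ (bs.drop m).drop k) := by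
    rw [List.take_append_drop, List.take_append_drop]
  have hB : ((bs.drop m).take k).length = k := by
    simp only [List.length_take, List.length_drop]
    omega
  have hC : ((bs.drop m).drop k).length = bs.length - m - k := by
    simp only [List.length_drop]
  have hvB : binVal ((bs.drop m).take k) < 2 ^ k := by
    have := binVal_lt ((bs.drop m).take k)
    rwa [hB] at this
  have hvC : binVal ((bs.drop m).drop k) < 2 ^ (bs.length - m - k) := by
    have := binVal_lt ((bs.drop m).drop k)
    rwa [hC] at this
  rw [Nat.one_shiftLeft, Nat.and_two_pow_sub_one_eq_mod, Nat.shiftRight_eq_div_pow]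
  conv_rhs => rw [hdecomp]
  rw [binVal_append, binVal_append, List.length_append, hB, hC]
  have harr : binVal (bs.take m) * 2 ^ (k + (bs.length - m - k))
        + (binVal ((bs.drop m).take k) * 2 ^ (bs.length - m - k) + binVal ((bs.drop m).drop k))
      = 2 ^ (bs.length - m - k) * (binVal (bs.take m) * 2 ^ k + binVal ((bs.drop m).take k))
        + binVal ((bs.drop m).drop k) := by
    rw [pow_add]
    ring
  have hlen : (bs.take m ++ ((bs.drop m).take k ++ (bs.drop m).drop k)).length = bs.length := by
    rw [← hdecomp]
  rw [hlen, harr, Nat.mul_add_div (by positivity), Nat.div_eq_of_lt hvC, Nat.add_zero,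
    mul_comm (binVal (List.take m bs)) (2 ^ k), Nat.mul_add_mod, Nat.mod_eq_of_lt hvB]

theorem bitLength_ge_two (n : Int) (h : 2 ≤ n.natAbs) : 2 ≤ PySem.Int.bitLength n := by
  by_contra hlt
  have hb : PySem.Int.bitLength n ≤ 1 := by omega
  have := PySem.Int.lt_two_pow_bitLength n
  have : n.natAbs < 2 := lt_of_lt_of_le this (by
    calc 2 ^ PySem.Int.bitLength n ≤ 2 ^ 1 := Nat.pow_le_pow_right (by omega) hb
    _ = 2 := rfl)
  omega

-- ===== VERDICT (by name: the statement is the Claim_ definition above) =====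
theorem encrypt_str_spec : Claim_equal_encrypt_str := by
  intro message pk hDom hPre
  obtain ⟨hE, hN⟩ := hPre
  unfold Spec_encrypt_str
  simp only [encrypt_str, encrypt_str_alt]
  -- characters are 7-bit
  have hchars : ∀ c ∈ message.toList, c.toNat < 128 := by
    unfold Dom_encrypt_str pvDomStr pvDomChar at hDom
    simp only [Bool.and_eq_true, List.all_eq_true] at hDom
    intro c hc
    have h := hDom.1 c hc
    simp only [Bool.or_eq_true, Bool.and_eq_true, decide_eq_true_eq, beq_iff_eq,
      Nat.le_iff_lt_or_eq] at h
    omega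
  have hk2 : 2 ≤ PySem.Int.bitLength pk.2 := bitLength_ge_two pk.2 hN
  have hk : 0 < PySem.Int.bitLength pk.2 - 1 := by omega
  rw [fold_chars message.toList 0 0 hchars]
  simp only [Nat.zero_mul, Nat.zero_add]
  rw [pad_count (8 * message.toList.length + 1) _ hk]
  have hstb : string_to_bits message = (message.toList.map (fun c => pvBlk c.toNat)).flatten := by
    unfold string_to_bits
    rw [join_nil_eq_flatten]
    rfl
  rw [hstb, padLoop_eq _ hk]
  have hFlen : ((message.toList.map (fun c => pvBlk c.toNat)).flatten).length
      = 8 * message.toList.length := flatten_blk_len _ hchars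
  have hlen1 : ((message.toList.map (fun c => pvBlk c.toNat)).flatten ++ ['1']).length
      = 8 * message.toList.length + 1 := by
    simp [hFlen]
  rw [hlen1]
  set k := PySem.Int.bitLength pk.2 - 1 with hkd
  set F := (message.toList.map fun c => pvBlk c.toNat).flatten with hFd
  set L1 := 8 * message.toList.length + 1 with hL1d
  set p := (k - L1 % k) % k with hpd
  set bsP := F ++ ['1'] ++ List.replicate p '0' with hbsd
  have hone : binVal ['1'] = 1 := rfl
  have hv' : (binVal F <<< 1 ||| 1) <<< p = binVal bsP := by
    rw [hbsd, binVal_append, binVal_replicate_zero, binVal_append, hone, List.length_replicate]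
    have h21 : binVal F <<< 1 ||| 1 = 2 ^ 1 * binVal F + 1 := by
      rw [Nat.shiftLeft_eq, mul_comm]
      exact (Nat.two_pow_add_eq_or_of_lt (by norm_num) _).symm
    rw [Nat.shiftLeft_eq, h21]
    simp only [List.length_cons, List.length_nil, pow_one]
    ring
  rw [hv']
  have hbsLen : bsP.length = L1 + p := by
    rw [hbsd]
    simp only [List.length_append, List.length_replicate, List.length_cons, List.length_nil, hFlen]
    omega
  rw [hbsLen]
  rw [PySem.List.foldl_append_eq_flatMap, PySem.List.foldl_append_singleton_eq_map,
    List.nil_append, List.nil_append, join_nil_eq_flatten]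
  rw [← List.flatMap_def]
  apply congrArg String.ofList
  apply List.flatMap_congr
  intro i hi
  rw [PySem.List.mem_pyRange_iff_of_pos (by exact_mod_cast hk)] at hi
  obtain ⟨h0, hiLt, hdvd⟩ := hi
  rw [sub_zero] at hdvd
  have hmI : i = ((i.toNat : Nat) : Int) := (Int.toNat_of_nonneg h0).symm
  have hkdvd : k ∣ i.toNat := by
    rw [hmI, Int.natCast_dvd_natCast] at hdvd
    exact hdvd
  have hdvdLp : k ∣ L1 + p := by
    rw [hpd]
    exact pad_dvd L1 k hk
  have hmk : i.toNat + k ≤ L1 + p := by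
    obtain ⟨a, ha⟩ := hkdvd
    obtain ⟨b, hb⟩ := hdvdLp
    have hiLp : i.toNat < L1 + p := by omega
    rw [ha, hb] at hiLp ⊢
    have hab : a < b := Nat.lt_of_mul_lt_mul_left hiLp
    calc k * a + k = k * (a + 1) := by ring
    _ ≤ k * b := Nat.mul_le_mul_left k hab
  conv_lhs => rw [hmI, PySem.List.slice_natCast_add bsP i.toNat k,
    block_eq bsP i.toNat k (by omega : i.toNat + k ≤ bsP.length), hbsLen]
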